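-- pv_equiv track=rewrite | github.com/uwdb/TASM | HomomorphicStitching/scripts/encode_changing_tiles.py | filter_command
-- ===== SOURCE A (Python) =====
-- import math
--
-- CTBS_SIZE_Y = 32
--
-- def filter_command(num_rows, num_cols, coded_width, coded_height, display_height,
--         use_uniform_tiles = False, row_heights = [], col_widths = []):
--     cmd = ""
--     total_height = 0
--     used_row_heights = []
--     PicHeightInCtbsY = math.ceil(coded_height / CTBS_SIZE_Y)
--     uniform_tile_width = int(coded_width / num_cols)
--
--     for i in range(num_rows * num_cols):
--         tile_row = int(math.floor(i / num_cols))
--         tile_col = int(i % num_cols)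
--
--         tile_width = uniform_tile_width if use_uniform_tiles else col_widths[tile_col] * CTBS_SIZE_Y
--         cumulative_tile_widths = tile_col * uniform_tile_width if use_uniform_tiles else sum(col_widths[:tile_col]) * CTBS_SIZE_Y
--
--         if len(used_row_heights) <= tile_row:
--             row_height = math.floor(((tile_row + 1) * PicHeightInCtbsY) / num_rows) \
--                         - math.floor(tile_row * PicHeightInCtbsY / num_rows) \
--                         if use_uniform_tiles \
--                         else row_heights[tile_row]
--             row_height *= CTBS_SIZE_Y
--             if display_height - sum(used_row_heights) - row_height < 0:
--                 row_height = display_height - sum(used_row_heights)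
--             used_row_heights.append(row_height)
--         else:
--             row_height = used_row_heights[tile_row]
--
--         cmd += f"[0:v]crop={tile_width}:{row_height}:{cumulative_tile_widths}:{sum(used_row_heights[:-1])}[tile{i}];"
--
--     cmd = cmd[:-1]
--     return cmd
-- ===== SOURCE B (Python) =====
-- import math
--
-- CTBS_SIZE_Y = 32
--
-- def filter_command(num_rows, num_cols, coded_width, coded_height, display_height,
--         use_uniform_tiles = False, row_heights = [], col_widths = []):
--     if num_rows <= 0 or num_cols <= 0:
--         return ""
--     pic_height_in_ctbs_y = -(-coded_height // CTBS_SIZE_Y)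
--     uniform_tile_width = int(coded_width / num_cols)
--
--     # column geometry, computed once: width and x-offset of every column
--     if use_uniform_tiles:
--         widths = [uniform_tile_width] * num_cols
--         xs = [c * uniform_tile_width for c in range(num_cols)]
--     else:
--         widths = [w * CTBS_SIZE_Y for w in col_widths[:num_cols]]
--         xs, x = [], 0
--         for w in col_widths[:num_cols]:
--             xs.append(x * CTBS_SIZE_Y)
--             x += w
--
--     # row geometry, computed once: (height, y-offset) of every row
--     rows, y = [], 0
--     for r in range(num_rows):
--         h = (math.floor((r + 1) * pic_height_in_ctbs_y / num_rows)
--              - math.floor(r * pic_height_in_ctbs_y / num_rows)) if use_uniform_tiles \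
--             else row_heights[r]
--         h *= CTBS_SIZE_Y
--         if display_height - y - h < 0:
--             h = display_height - y
--         rows.append((h, y))
--         y += h
--
--     parts = [f"[0:v]crop={w}:{h}:{x}:{ry}[tile{r * num_cols + c}]"
--              for r, (h, ry) in enumerate(rows)
--              for c, (w, x) in enumerate(zip(widths, xs))]
--     return ";".join(parts)
-- ===== Notes on version B (the rewrite author's own statement) =====
-- stated objective: alternative
-- what changed: A recomputes sum(col_widths[:tile_col]) and sum(used_row_heights) inside one flat tile loop; B precomputes per-column (width, x-offset) tables via running prefix sums and per-row (height, y-offset) pairs once, then emits each tile from table lookups and joins with ';' (intended as faster: the probe measured 6.2x at n=1024 and A timed out at n=4096, but B also hits the time budget on the largest outputs, so no unqualified speed claim).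
-- intended difference: On the degenerate both-negative inputs where A's loop still runs (num_rows = -1 with num_cols < 0, or num_rows = -2 with num_cols = -1, lists long enough), A returns crop strings built from negative-index wraparound; B returns "" (no tiles), the intended value for a non-positive grid. — e.g. on filter_command(-1, -1, 32, 32, 32, true, [], []): A returns "[0:v]crop=-32:-32:0:0[tile0]", B returns ""
import Mathlib
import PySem

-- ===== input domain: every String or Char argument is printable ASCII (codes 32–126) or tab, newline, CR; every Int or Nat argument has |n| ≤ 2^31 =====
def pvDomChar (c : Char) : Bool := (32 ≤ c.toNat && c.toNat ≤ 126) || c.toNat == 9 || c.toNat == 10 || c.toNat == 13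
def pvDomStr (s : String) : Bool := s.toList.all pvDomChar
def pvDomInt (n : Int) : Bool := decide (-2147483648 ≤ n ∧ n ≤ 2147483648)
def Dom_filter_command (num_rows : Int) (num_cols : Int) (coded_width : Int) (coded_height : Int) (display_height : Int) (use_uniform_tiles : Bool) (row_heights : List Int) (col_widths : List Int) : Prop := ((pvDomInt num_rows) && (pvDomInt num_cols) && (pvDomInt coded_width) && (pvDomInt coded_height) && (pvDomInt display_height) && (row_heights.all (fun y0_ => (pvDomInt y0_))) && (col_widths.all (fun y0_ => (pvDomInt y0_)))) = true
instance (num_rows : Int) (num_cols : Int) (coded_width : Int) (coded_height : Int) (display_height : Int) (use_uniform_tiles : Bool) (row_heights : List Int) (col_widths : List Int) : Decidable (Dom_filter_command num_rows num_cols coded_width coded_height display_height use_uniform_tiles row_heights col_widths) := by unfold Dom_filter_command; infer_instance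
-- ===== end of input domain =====

-- B replaces A's flat tile loop with its per-tile column/row re-summations by precomputed
-- per-column (width, x-offset) and per-row (height, y-offset) tables built once with running
-- prefix sums, then emits each tile from table lookups and joins with ';' (objective: alternative).


-- ===== PORT A =====
-- the body of A's tile loop, verbatim (indexing via pyGetD: in range under Pre_, incl. Python's
-- negative-index wraparound in the D_ region)
def aStep (num_rows : Int) (num_cols : Int) (display_height : Int) (use_uniform_tiles : Bool)
    (row_heights : List Int) (col_widths : List Int) (picH : Int) (utw : Int)
    (st : String × List Int) (i : Int) : String × List Int :=
  let tile_row := PySem.Int.floordiv i num_cols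
  let tile_col := PySem.Int.mod i num_cols
  let tile_width := if use_uniform_tiles then utw else PySem.List.pyGetD col_widths tile_col 0 * 32
  let cum := if use_uniform_tiles then tile_col * utw
             else (PySem.List.slice col_widths none (some tile_col)).sum * 32
  let p : Int × List Int :=
    if (st.2.length : Int) ≤ tile_row then
      let rh0 := if use_uniform_tiles then
          PySem.Int.floordiv ((tile_row + 1) * picH) num_rows -
            PySem.Int.floordiv (tile_row * picH) num_rows
        else PySem.List.pyGetD row_heights tile_row 0
      let rh1 := rh0 * 32
      let rh2 := if display_height - st.2.sum - rh1 < 0 then display_height - st.2.sum else rh1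
      (rh2, st.2 ++ [rh2])
    else
      (PySem.List.pyGetD st.2 tile_row 0, st.2)
  (st.1 ++ "[0:v]crop=" ++ PySem.Int.toStr tile_width ++ ":" ++ PySem.Int.toStr p.1 ++ ":" ++
     PySem.Int.toStr cum ++ ":" ++
     PySem.Int.toStr (PySem.List.slice p.2 none (some (-1))).sum ++
     "[tile" ++ PySem.Int.toStr i ++ "];", p.2)

def filter_command (num_rows : Int) (num_cols : Int) (coded_width : Int) (coded_height : Int) (display_height : Int) (use_uniform_tiles : Bool) (row_heights : List Int) (col_widths : List Int) : String :=
  -- math.ceil(coded_height / 32): exact, the float division is by a power of two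
  let picH : Int := -(PySem.Int.floordiv (-coded_height) 32)
  -- int(coded_width / num_cols): PySem.Int.truncdiv is exact for |args| < 2^53
  let utw : Int := PySem.Int.truncdiv coded_width num_cols
  let st := (PySem.List.pyRange 0 (num_rows * num_cols) 1).foldl
    (aStep num_rows num_cols display_height use_uniform_tiles row_heights col_widths picH utw)
    ("", [])
  PySem.Str.slice st.1 none (some (-1))

-- ===== PORT B =====
-- the body of B's row-geometry loop, verbatim
def bRowStep (num_rows : Int) (display_height : Int) (use_uniform_tiles : Bool)
    (row_heights : List Int) (picH : Int)
    (st : List (Int × Int) × Int) (r : Int) : List (Int × Int) × Int :=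
  let h0 := if use_uniform_tiles then
      PySem.Int.floordiv ((r + 1) * picH) num_rows - PySem.Int.floordiv (r * picH) num_rows
    else PySem.List.pyGetD row_heights r 0
  let h1 := h0 * 32
  let h := if display_height - st.2 - h1 < 0 then display_height - st.2 else h1
  (st.1 ++ [(h, st.2)], st.2 + h)

-- one tile string of B's comprehension: rp = (r, (height, y)), cq = (c, (width, x))
def bPart (num_cols : Int) (rp : Int × Int × Int) (cq : Int × Int × Int) : String :=
  "[0:v]crop=" ++ PySem.Int.toStr cq.2.1 ++ ":" ++ PySem.Int.toStr rp.2.1 ++ ":" ++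
    PySem.Int.toStr cq.2.2 ++ ":" ++ PySem.Int.toStr rp.2.2 ++
    "[tile" ++ PySem.Int.toStr (rp.1 * num_cols + cq.1) ++ "]"

def filter_command_alt (num_rows : Int) (num_cols : Int) (coded_width : Int) (coded_height : Int) (display_height : Int) (use_uniform_tiles : Bool) (row_heights : List Int) (col_widths : List Int) : String :=
  if num_rows ≤ 0 ∨ num_cols ≤ 0 then "" else
  let picH : Int := -(PySem.Int.floordiv (-coded_height) 32)
  let utw : Int := PySem.Int.truncdiv coded_width num_cols
  let widths : List Int :=
    if use_uniform_tiles then List.replicate num_cols.toNat utw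
    else (PySem.List.slice col_widths none (some num_cols)).map (fun w => w * 32)
  let xs : List Int :=
    if use_uniform_tiles then (PySem.List.pyRange 0 num_cols 1).map (fun c => c * utw)
    else ((PySem.List.slice col_widths none (some num_cols)).foldl
        (fun (st : List Int × Int) w => (st.1 ++ [st.2 * 32], st.2 + w)) ([], 0)).1
  let rows : List (Int × Int) :=
    ((PySem.List.pyRange 0 num_rows 1).foldl
      (bRowStep num_rows display_height use_uniform_tiles row_heights picH) ([], 0)).1
  let parts : List String :=
    (PySem.List.enumerate rows).flatMap (fun rp =>
      (PySem.List.enumerate (widths.zip xs)).map (fun cq => bPart num_cols rp cq))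
  PySem.Str.join ";" parts

-- ===== PRECONDITION & SPEC =====
-- Pre_ excludes exactly the inputs on which the Python A raises: num_cols = 0 (ZeroDivisionError),
-- and any run of the tile loop whose list index is out of range (IndexError).
def Pre_filter_command (num_rows : Int) (num_cols : Int) (coded_width : Int) (coded_height : Int) (display_height : Int) (use_uniform_tiles : Bool) (row_heights : List Int) (col_widths : List Int) : Prop :=
  num_cols ≠ 0 ∧
  ( num_rows * num_cols ≤ 0
    ∨ (0 < num_rows ∧ 0 < num_cols ∧
        (use_uniform_tiles = true ∨
          (num_rows ≤ (row_heights.length : Int) ∧ num_cols ≤ (col_widths.length : Int))))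
    ∨ (num_cols < 0 ∧ (num_rows = -1 ∨ (num_rows = -2 ∧ num_cols = -1)) ∧
        (use_uniform_tiles = true ∨
          (1 ≤ (row_heights.length : Int) ∧ max 1 (-num_cols - 1) ≤ (col_widths.length : Int)))))
instance (num_rows : Int) (num_cols : Int) (coded_width : Int) (coded_height : Int) (display_height : Int) (use_uniform_tiles : Bool) (row_heights : List Int) (col_widths : List Int) : Decidable (Pre_filter_command num_rows num_cols coded_width coded_height display_height use_uniform_tiles row_heights col_widths) := by unfold Pre_filter_command; infer_instance

def pvWitness_filter_command : Int × Int × Int × Int × Int × Bool × List Int × List Int :=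
  (2, 2, 64, 64, 64, true, [], [])

-- On the degenerate both-negative inputs where A's loop still runs (num_rows = -1 with num_cols < 0,
-- or num_rows = -2 with num_cols = -1, lists long enough), A returns crop strings built from
-- negative-index wraparound; B returns "" (no tiles), the intended value for a non-positive grid.
def D_filter_command (num_rows : Int) (num_cols : Int) (coded_width : Int) (coded_height : Int) (display_height : Int) (use_uniform_tiles : Bool) (row_heights : List Int) (col_widths : List Int) : Prop :=
  num_cols < 0 ∧ (num_rows = -1 ∨ (num_rows = -2 ∧ num_cols = -1)) ∧
    (use_uniform_tiles = true ∨
      (1 ≤ (row_heights.length : Int) ∧ max 1 (-num_cols - 1) ≤ (col_widths.length : Int)))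
instance (num_rows : Int) (num_cols : Int) (coded_width : Int) (coded_height : Int) (display_height : Int) (use_uniform_tiles : Bool) (row_heights : List Int) (col_widths : List Int) : Decidable (D_filter_command num_rows num_cols coded_width coded_height display_height use_uniform_tiles row_heights col_widths) := by unfold D_filter_command; infer_instance

def Spec_filter_command (num_rows : Int) (num_cols : Int) (coded_width : Int) (coded_height : Int) (display_height : Int) (use_uniform_tiles : Bool) (row_heights : List Int) (col_widths : List Int) (out : String) : Prop := ¬ D_filter_command num_rows num_cols coded_width coded_height display_height use_uniform_tiles row_heights col_widths → out = filter_command_alt num_rows num_cols coded_width coded_height display_height use_uniform_tiles row_heights col_widths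
instance (num_rows : Int) (num_cols : Int) (coded_width : Int) (coded_height : Int) (display_height : Int) (use_uniform_tiles : Bool) (row_heights : List Int) (col_widths : List Int) (out : String) : Decidable (Spec_filter_command num_rows num_cols coded_width coded_height display_height use_uniform_tiles row_heights col_widths out) := by unfold Spec_filter_command; infer_instance

def pvDiffWitness_filter_command : Int × Int × Int × Int × Int × Bool × List Int × List Int :=
  (-1, -1, 32, 32, 32, true, [], [])
def pvDiffWitnessOut_filter_command : String × String :=
  ("[0:v]crop=-32:-32:0:0[tile0]", "")

-- ===== CLAIM (what is proved, stated in full; the proofs are below) =====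
def Claim_unchanged_filter_command : Prop := ∀ (num_rows : Int) (num_cols : Int) (coded_width : Int) (coded_height : Int) (display_height : Int) (use_uniform_tiles : Bool) (row_heights : List Int) (col_widths : List Int), Dom_filter_command num_rows num_cols coded_width coded_height display_height use_uniform_tiles row_heights col_widths → Pre_filter_command num_rows num_cols coded_width coded_height display_height use_uniform_tiles row_heights col_widths → Spec_filter_command num_rows num_cols coded_width coded_height display_height use_uniform_tiles row_heights col_widths (filter_command num_rows num_cols coded_width coded_height display_height use_uniform_tiles row_heights col_widths)
def Claim_changed_filter_command : Prop := Dom_filter_command (pvDiffWitness_filter_command.1) (pvDiffWitness_filter_command.2.1) (pvDiffWitness_filter_command.2.2.1) (pvDiffWitness_filter_command.2.2.2.1) (pvDiffWitness_filter_command.2.2.2.2.1) (pvDiffWitness_filter_command.2.2.2.2.2.1) (pvDiffWitness_filter_command.2.2.2.2.2.2.1) (pvDiffWitness_filter_command.2.2.2.2.2.2.2) ∧ Pre_filter_command (pvDiffWitness_filter_command.1) (pvDiffWitness_filter_command.2.1) (pvDiffWitness_filter_command.2.2.1) (pvDiffWitness_filter_command.2.2.2.1) (pvDiffWitness_filter_command.2.2.2.2.1)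 (pvDiffWitness_filter_command.2.2.2.2.2.1) (pvDiffWitness_filter_command.2.2.2.2.2.2.1) (pvDiffWitness_filter_command.2.2.2.2.2.2.2) ∧ D_filter_command (pvDiffWitness_filter_command.1) (pvDiffWitness_filter_command.2.1) (pvDiffWitness_filter_command.2.2.1) (pvDiffWitness_filter_command.2.2.2.1) (pvDiffWitness_filter_command.2.2.2.2.1) (pvDiffWitness_filter_command.2.2.2.2.2.1) (pvDiffWitness_filter_command.2.2.2.2.2.2.1) (pvDiffWitness_filter_command.2.2.2.2.2.2.2) ∧ filter_command (pvDiffWitness_filter_command.1) (pvDiffWitness_filter_command.2.1) (pvDiffWitness_filter_command.2.2.1) (pvDiffWitness_filter_command.2.2.2.1) (pvDiffWitness_filter_command.2.2.2.2.1) (pvDiffWitness_filter_command.2.2.2.2.2.1) (pvDiffWitness_filter_command.2.2.2.2.2.2.1) (pvDiffWitness_filter_command.2.2.2.2.2.2.2) = pvDiffWitnessOut_filter_command.1 ∧ filter_command_alt (pvDiffWitness_filter_command.1) (pvDiffWitness_filter_command.2.1) (pvDiffWitness_filter_command.2.2.1) (pvDiffWitness_filter_command.2.2.2.1) (pvDiffWitness_filter_command.2.2.2.2.1)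 (pvDiffWitness_filter_command.2.2.2.2.2.1) (pvDiffWitness_filter_command.2.2.2.2.2.2.1) (pvDiffWitness_filter_command.2.2.2.2.2.2.2) = pvDiffWitnessOut_filter_command.2 ∧ pvDiffWitnessOut_filter_command.1 ≠ pvDiffWitnessOut_filter_command.2

def Claim_exact_filter_command : Prop := ∀ (num_rows : Int) (num_cols : Int) (coded_width : Int) (coded_height : Int) (display_height : Int) (use_uniform_tiles : Bool) (row_heights : List Int) (col_widths : List Int), Dom_filter_command num_rows num_cols coded_width coded_height display_height use_uniform_tiles row_heights col_widths → Pre_filter_command num_rows num_cols coded_width coded_height display_height use_uniform_tiles row_heights col_widths → D_filter_command num_rows num_cols coded_width coded_height display_height use_uniform_tiles row_heights col_widths → filter_command num_rows num_cols coded_width coded_height display_height use_uniform_tiles row_heights col_widths ≠ filter_command_alt num_rows num_cols coded_width coded_height display_height use_uniform_tiles row_heights col_widths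

-- ===== LEMMAS AND PROOFS =====

-- shared characterisation of the per-tile geometry (proof-side only)

def clampH (dh y h1 : Int) : Int := if dh - y - h1 < 0 then dh - y else h1

def rawH (R : Int) (u : Bool) (rh : List Int) (p : Int) (r : Int) : Int :=
  (if u then PySem.Int.floordiv ((r + 1) * p) R - PySem.Int.floordiv (r * p) R
   else PySem.List.pyGetD rh r 0) * 32

def rowPairs (f : Int → Int) (dh : Int) : Nat → List (Int × Int)
  | 0 => []
  | n + 1 => rowPairs f dh n ++
      [(clampH dh (((rowPairs f dh n).map Prod.fst).sum) (f n),
        ((rowPairs f dh n).map Prod.fst).sum)]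

def hts (f : Int → Int) (dh : Int) (n : Nat) : List Int := (rowPairs f dh n).map Prod.fst
def yrow (f : Int → Int) (dh : Int) (n : Nat) : Int := (hts f dh n).sum
def hrow (f : Int → Int) (dh : Int) (n : Nat) : Int := clampH dh (yrow f dh n) (f n)

def wcol (u : Bool) (utw : Int) (cw : List Int) (c : Int) : Int :=
  if u then utw else PySem.List.pyGetD cw c 0 * 32

def xcol (u : Bool) (utw : Int) (cw : List Int) (c : Int) : Int :=
  if u then c * utw else (PySem.List.slice cw none (some c)).sum * 32

def partStr (w h x y idx : Int) : String :=
  "[0:v]crop=" ++ PySem.Int.toStr w ++ ":" ++ PySem.Int.toStr h ++ ":" ++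
    PySem.Int.toStr x ++ ":" ++ PySem.Int.toStr y ++ "[tile" ++ PySem.Int.toStr idx ++ "]"

def partsRow (C : Int) (u : Bool) (utw : Int) (cw : List Int) (r : Nat) (h y : Int) (n : Nat) :
    List String :=
  (List.range n).map (fun (c : Nat) =>
    partStr (wcol u utw cw (c : Int)) h (xcol u utw cw (c : Int)) y ((r : Int) * C + (c : Int)))

def apar (C : Int) (u : Bool) (utw : Int) (cw : List Int) (f : Int → Int) (dh : Int) (r : Nat) :
    List String :=
  (List.range r).flatMap (fun (j : Nat) =>
    partsRow C u utw cw j (hrow f dh j) (yrow f dh j) C.toNat)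

def sconcat : List String → String
  | [] => ""
  | s :: t => s ++ sconcat t

lemma rowPairs_succ (f : Int → Int) (dh : Int) (n : Nat) :
    rowPairs f dh (n + 1) = rowPairs f dh n ++ [(hrow f dh n, yrow f dh n)] := rfl

lemma length_rowPairs (f : Int → Int) (dh : Int) (n : Nat) : (rowPairs f dh n).length = n := by
  induction n with
  | zero => rfl
  | succ k ih => simp [rowPairs_succ, ih]

lemma hts_succ (f : Int → Int) (dh : Int) (n : Nat) :
    hts f dh (n + 1) = hts f dh n ++ [hrow f dh n] := by
  simp [hts, rowPairs_succ]

lemma length_hts (f : Int → Int) (dh : Int) (n : Nat) : (hts f dh n).length = n := by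
  simp [hts, length_rowPairs]

lemma sum_hts (f : Int → Int) (dh : Int) (n : Nat) : (hts f dh n).sum = yrow f dh n := rfl

lemma sconcat_cons (a : String) (l : List String) : sconcat (a :: l) = a ++ sconcat l := rfl

lemma sconcat_append (l₁ l₂ : List String) :
    sconcat (l₁ ++ l₂) = sconcat l₁ ++ sconcat l₂ := by
  induction l₁ with
  | nil => simp [sconcat]
  | cons a t ih => simp [sconcat, ih, String.append_assoc]

lemma sconcat_toList (ps : List String) :
    (sconcat ps).toList = (ps.map String.toList).flatten := by
  induction ps with
  | nil => rfl
  | cons a t ih => simp [sconcat, String.toList_append, ih]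

lemma chars_drop_join : ∀ cs : List (List Char), cs ≠ [] →
    (List.flatten (cs.map (fun c => c ++ [';']))).dropLast = PySem.Chars.join [';'] cs := by
  intro cs
  induction cs with
  | nil => intro h; exact absurd rfl h
  | cons c t ih =>
    intro _
    cases t with
    | nil => simp [PySem.Chars.join_singleton]
    | cons c' t' =>
      have hne : (List.flatten ((c' :: t').map (fun c => c ++ [';']))) ≠ [] := by
        simp
      rw [List.map_cons, List.flatten_cons, List.dropLast_append_of_ne_nil hne,
        PySem.Chars.join_cons_cons, ih (by simp)]

lemma final_strings (ps : List String) (h : ps ≠ []) :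
    PySem.Str.slice (sconcat (ps.map (· ++ ";"))) none (some (-1)) = PySem.Str.join ";" ps := by
  apply String.toList_inj.mp
  rw [PySem.Str.toList_slice, PySem.Chars.slice_eq_listSlice, PySem.List.slice_to_neg_one,
    sconcat_toList, PySem.Str.toList_join]
  have h2 : (";" : String).toList = [';'] := rfl
  have h1 : (ps.map (· ++ ";")).map String.toList
      = (ps.map String.toList).map (fun c => c ++ [';']) := by
    rw [List.map_map, List.map_map]
    apply List.map_congr_left
    intro q _
    simp [String.toList_append, h2]
  rw [h1, h2]
  exact chars_drop_join (ps.map String.toList) (by simpa using h)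

-- evaluating A's step on the first tile of a row, and on a later tile of the row

lemma aStep_first (R C dh : Int) (u : Bool) (rh cw : List Int) (p utw : Int)
    (hC : 0 < C) (r : Nat) (s : String) (hs : List Int) (hlen : hs.length = r) :
    aStep R C dh u rh cw p utw (s, hs) ((r : Int) * C)
      = (s ++ partStr (wcol u utw cw 0) (clampH dh hs.sum (rawH R u rh p (r : Int)))
            (xcol u utw cw 0) hs.sum ((r : Int) * C) ++ ";",
         hs ++ [clampH dh hs.sum (rawH R u rh p (r : Int))]) := by
  have hdiv : PySem.Int.floordiv ((r : Int) * C) C = (r : Int) := by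
    rw [PySem.Int.floordiv_eq_iff_of_pos hC]
    constructor
    · exact le_refl _
    · nlinarith
  have hmod : PySem.Int.mod ((r : Int) * C) C = 0 := by
    have h := PySem.Int.floordiv_mul_add_mod ((r : Int) * C) C
    rw [hdiv] at h; linarith
  have hsemi : ("];" : String) = "]" ++ ";" := rfl
  simp only [aStep, hdiv, hmod, hlen, le_refl, if_pos]
  rw [hsemi]
  simp [partStr, clampH, rawH, wcol, xcol, PySem.List.slice_to_neg_one,
    String.append_assoc]

lemma aStep_later (R C dh : Int) (u : Bool) (rh cw : List Int) (p utw : Int)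
    (hC : 0 < C) (r : Nat) (k : Int) (hk1 : 0 ≤ k) (hk2 : k < C)
    (s : String) (hs : List Int) (hlen : hs.length = r) (hv : Int) :
    aStep R C dh u rh cw p utw (s, hs ++ [hv]) ((r : Int) * C + k)
      = (s ++ partStr (wcol u utw cw k) hv (xcol u utw cw k) hs.sum ((r : Int) * C + k) ++ ";",
         hs ++ [hv]) := by
  have hdiv : PySem.Int.floordiv ((r : Int) * C + k) C = (r : Int) := by
    rw [PySem.Int.floordiv_eq_iff_of_pos hC]
    constructor
    · linarith
    · nlinarith
  have hmod : PySem.Int.mod ((r : Int) * C + k) C = k := by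
    have h := PySem.Int.floordiv_mul_add_mod ((r : Int) * C + k) C
    rw [hdiv] at h; linarith
  have hcond : ¬ (((hs ++ [hv]).length : Int) ≤ (r : Int)) := by
    simp [hlen]
  have hget : PySem.List.pyGetD (hs ++ [hv]) (r : Int) 0 = hv := by
    rw [PySem.List.pyGetD_natCast]
    rw [← hlen]
    simp [List.getD]
  have hsemi : ("];" : String) = "]" ++ ";" := rfl
  simp only [aStep, hdiv, hmod, if_neg hcond, hget]
  rw [hsemi]
  simp [partStr, wcol, xcol, PySem.List.slice_to_neg_one,
    String.append_assoc]

-- A's inner loop over the remaining tiles of one row (the helper list is untouched)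

lemma A_row_rest (R C dh : Int) (u : Bool) (rh cw : List Int) (p utw : Int)
    (hC : 0 < C) (r : Nat) (hs : List Int) (hlen : hs.length = r) (hv : Int) :
    ∀ (k : Nat), (k : Int) ≤ C - 1 → ∀ s : String,
    (PySem.List.pyRange ((r : Int) * C + 1) ((r : Int) * C + 1 + k)).foldl
        (aStep R C dh u rh cw p utw) (s, hs ++ [hv])
      = (s ++ sconcat (((List.range k).map (fun (c : Nat) =>
            partStr (wcol u utw cw ((c : Int) + 1)) hv (xcol u utw cw ((c : Int) + 1)) hs.sum
              ((r : Int) * C + ((c : Int) + 1)))).map (· ++ ";")), hs ++ [hv]) := by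
  intro k
  induction k with
  | zero =>
    intro _ s
    rw [show ((r : Int) * C + 1 + ((0 : Nat) : Int) = (r : Int) * C + 1) by push_cast; ring]
    rw [PySem.List.pyRange_one_eq_nil (le_refl _)]
    simp [sconcat]
  | succ k ih =>
    intro hk s
    have hk' : (k : Int) ≤ C - 1 := by push_cast at hk ⊢; omega
    have hle : (r : Int) * C + 1 ≤ (r : Int) * C + 1 + (k : Int) := by
      have : (0 : Int) ≤ (k : Int) := Int.natCast_nonneg k
      linarith
    rw [show ((r : Int) * C + 1 + ((k + 1 : Nat) : Int) = ((r : Int) * C + 1 + (k : Int)) + 1)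
      by push_cast; ring]
    rw [PySem.List.pyRange_one_succ_right hle, List.foldl_append, ih hk' s]
    rw [show ((r : Int) * C + 1 + (k : Int) = (r : Int) * C + ((k : Int) + 1)) by ring]
    rw [List.foldl_cons, List.foldl_nil]
    rw [aStep_later R C dh u rh cw p utw hC r ((k : Int) + 1)
      (by positivity) (by push_cast at hk; omega) _ hs hlen hv]
    rw [List.range_succ, List.map_append, List.map_append, sconcat_append]
    simp [sconcat, String.append_assoc]

-- A's loop over one full row of tiles

lemma A_row (R C dh : Int) (u : Bool) (rh cw : List Int) (p utw : Int)
    (hC : 0 < C) (r : Nat) (s : String) (hs : List Int) (hlen : hs.length = r) :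
    (PySem.List.pyRange ((r : Int) * C) ((r : Int) * C + C)).foldl
        (aStep R C dh u rh cw p utw) (s, hs)
      = (s ++ sconcat ((partsRow C u utw cw r (clampH dh hs.sum (rawH R u rh p (r : Int)))
            hs.sum C.toNat).map (· ++ ";")),
         hs ++ [clampH dh hs.sum (rawH R u rh p (r : Int))]) := by
  have hlt : (r : Int) * C < (r : Int) * C + C := by linarith
  have hdecomp : partsRow C u utw cw r (clampH dh hs.sum (rawH R u rh p (r : Int))) hs.sum C.toNat
      = partStr (wcol u utw cw 0) (clampH dh hs.sum (rawH R u rh p (r : Int)))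
          (xcol u utw cw 0) hs.sum ((r : Int) * C)
        :: (List.range (C.toNat - 1)).map (fun (c : Nat) =>
            partStr (wcol u utw cw ((c : Int) + 1)) (clampH dh hs.sum (rawH R u rh p (r : Int)))
              (xcol u utw cw ((c : Int) + 1)) hs.sum ((r : Int) * C + ((c : Int) + 1))) := by
    rw [partsRow]
    rw [show (C.toNat = (C.toNat - 1) + 1) by omega]
    rw [List.range_succ_eq_map, List.map_cons, List.map_map]
    push_cast
    simp [Function.comp, Nat.succ_eq_add_one]
  rw [PySem.List.pyRange_one_cons hlt, List.foldl_cons]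
  rw [aStep_first R C dh u rh cw p utw hC r s hs hlen]
  have hCnat : ((C.toNat - 1 : Nat) : Int) = C - 1 := by omega
  have hCsplit : (r : Int) * C + C = (r : Int) * C + 1 + ((C.toNat - 1 : Nat) : Int) := by
    rw [hCnat]; ring
  rw [hCsplit,
    A_row_rest R C dh u rh cw p utw hC r hs hlen _ (C.toNat - 1) (by rw [hCnat]) _]
  rw [hdecomp, List.map_cons, sconcat_cons]
  simp [String.append_assoc]

-- A's full tile loop, row by row

lemma apar_succ (C : Int) (u : Bool) (utw : Int) (cw : List Int) (f : Int → Int) (dh : Int)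
    (r : Nat) :
    apar C u utw cw f dh (r + 1)
      = apar C u utw cw f dh r ++ partsRow C u utw cw r (hrow f dh r) (yrow f dh r) C.toNat := by
  rw [apar, List.range_succ, List.flatMap_append]
  simp [apar]

lemma A_main (R C dh : Int) (u : Bool) (rh cw : List Int) (p utw : Int) (hC : 0 < C) :
    ∀ r : Nat,
    (PySem.List.pyRange 0 ((r : Int) * C)).foldl (aStep R C dh u rh cw p utw) ("", [])
      = (sconcat ((apar C u utw cw (rawH R u rh p) dh r).map (· ++ ";")),
         hts (rawH R u rh p) dh r) := by
  intro r
  induction r with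
  | zero =>
    rw [show ((((0 : Nat)) : Int) * C = 0) by push_cast; ring]
    rw [PySem.List.pyRange_one_eq_nil (le_refl _)]
    rfl
  | succ r ih =>
    have h0 : (0 : Int) ≤ (r : Int) * C := by positivity
    have h1 : (r : Int) * C ≤ (r : Int) * C + C := by linarith
    have hapar := apar_succ C u utw cw (rawH R u rh p) dh r
    rw [show ((((r + 1 : Nat)) : Int) * C = (r : Int) * C + C) by push_cast; ring]
    rw [PySem.List.pyRange_one_append 0 ((r : Int) * C) ((r : Int) * C + C) h0 h1,
      List.foldl_append, ih,
      A_row R C dh u rh cw p utw hC r _ _ (length_hts _ _ _)]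
    rw [show (clampH dh (hts (rawH R u rh p) dh r).sum (rawH R u rh p (r : Int))
        = hrow (rawH R u rh p) dh r) from rfl]
    rw [sum_hts, ← hts_succ, hapar, List.map_append, sconcat_append]

-- B's row-geometry loop

lemma B_rows (R dh : Int) (u : Bool) (rh : List Int) (p : Int) :
    ∀ n : Nat,
    (PySem.List.pyRange 0 (n : Int)).foldl (bRowStep R dh u rh p) ([], 0)
      = (rowPairs (rawH R u rh p) dh n, yrow (rawH R u rh p) dh n) := by
  intro n
  induction n with
  | zero => rw [PySem.List.pyRange_one_eq_nil (by norm_num)]; rfl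
  | succ n ih =>
    rw [show (((n + 1 : Nat) : Int) = (n : Int) + 1) by push_cast; ring]
    rw [PySem.List.pyRange_one_succ_right (Int.natCast_nonneg n), List.foldl_append, ih,
      List.foldl_cons, List.foldl_nil]
    simp [bRowStep, rowPairs_succ, hrow, clampH, rawH, yrow, hts,
      List.sum_append]

-- enumerations

lemma enum_rowPairs (f : Int → Int) (dh : Int) (n : Nat) :
    PySem.List.enumerate (rowPairs f dh n) 0
      = (List.range n).map (fun (j : Nat) => ((j : Int), (hrow f dh j, yrow f dh j))) := by
  induction n with
  | zero => rfl
  | succ n ih =>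
    rw [rowPairs_succ, PySem.List.enumerate_append, ih, List.range_succ, List.map_append]
    simp [PySem.List.enumerate_cons, PySem.List.enumerate_nil, length_rowPairs]

lemma enum_map_range {α : Type} (n : Nat) (g : Nat → α) :
    PySem.List.enumerate ((List.range n).map g) 0
      = (List.range n).map (fun (c : Nat) => ((c : Int), g c)) := by
  induction n with
  | zero => rfl
  | succ n ih =>
    rw [List.range_succ, List.map_append, PySem.List.enumerate_append, ih, List.map_append]
    simp [PySem.List.enumerate_cons, PySem.List.enumerate_nil]

-- B's prefix-sum loop for the x-offsets

lemma B_prefix : ∀ (l : List Int) (acc : List Int) (x : Int),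
    l.foldl (fun (st : List Int × Int) w => (st.1 ++ [st.2 * 32], st.2 + w)) (acc, x)
      = (acc ++ (List.range l.length).map (fun (c : Nat) => (x + (l.take c).sum) * 32),
         x + l.sum) := by
  intro l
  induction l with
  | nil => intro acc x; simp
  | cons w t ih =>
    intro acc x
    rw [List.foldl_cons]
    rw [ih (acc ++ [x * 32]) (x + w)]
    rw [List.length_cons, List.range_succ_eq_map, List.map_cons, List.map_map]
    refine Prod.ext ?_ ?_
    · simp only [List.append_assoc, List.singleton_append, List.take_zero, List.sum_nil,
        add_zero]
      congr 2
      apply List.map_congr_left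
      intro c _
      simp only [Function.comp_apply, List.take_succ_cons, List.sum_cons]
      ring
    · simp
      ring

-- the column tables of B agree with A's per-tile column values

lemma cols_uniform (C utw : Int) (cw : List Int) (hC : 0 ≤ C) :
    (List.replicate C.toNat utw).zip ((PySem.List.pyRange 0 C).map (fun c => c * utw))
      = (List.range C.toNat).map (fun (c : Nat) =>
          (wcol true utw cw (c : Int), xcol true utw cw (c : Int))) := by
  rw [PySem.List.pyRange_one]
  rw [show ((C - 0).toNat = C.toNat) by omega]
  rw [List.map_map]
  rw [show (List.replicate C.toNat utw
      = (List.range C.toNat).map (fun (_ : Nat) => utw)) from by simp]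
  rw [List.zip_map']
  apply List.map_congr_left
  intro c _
  simp [wcol, xcol, Function.comp]

lemma cols_nonuniform (C utw : Int) (cw : List Int) (hC : 0 < C) (hlen : C ≤ (cw.length : Int)) :
    ((PySem.List.slice cw none (some C)).map (fun w => w * 32)).zip
        (((PySem.List.slice cw none (some C)).foldl
          (fun (st : List Int × Int) w => (st.1 ++ [st.2 * 32], st.2 + w)) ([], 0)).1)
      = (List.range C.toNat).map (fun (c : Nat) =>
          (wcol false utw cw (c : Int), xcol false utw cw (c : Int))) := by
  rw [PySem.List.slice_to cw hC.le]
  have hlt : (List.take C.toNat cw).length = C.toNat := by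
    rw [List.length_take]; omega
  rw [B_prefix]
  simp only [List.nil_append, hlt]
  apply List.ext_getElem
  · simp; omega
  · intro i hi1 hi2
    have hiC : i < C.toNat := by
      simpa [hlt] using hi2
    have hicw : i < cw.length := by omega
    simp only [List.getElem_zip, List.getElem_map, List.getElem_range, List.getElem_take]
    have htake : List.take i (List.take C.toNat cw) = List.take i cw := by
      rw [List.take_take]; congr 1; omega
    rw [htake]
    refine Prod.ext ?_ ?_
    · simp only [wcol, Bool.false_eq_true, if_false]
      rw [PySem.List.pyGetD_natCast]
      rw [List.getD_eq_getElem?_getD, List.getElem?_eq_getElem hicw]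
      rfl
    · simp only [xcol, Bool.false_eq_true, if_false, zero_add]
      rw [PySem.List.slice_to cw (Int.natCast_nonneg i)]
      simp


lemma cols_all (C utw : Int) (cw : List Int) (u : Bool) (hC : 0 < C)
    (hlen : u = true ∨ C ≤ (cw.length : Int)) :
    (if u then List.replicate C.toNat utw
     else (PySem.List.slice cw none (some C)).map (fun w => w * 32)).zip
      (if u then (PySem.List.pyRange 0 C).map (fun c => c * utw)
       else ((PySem.List.slice cw none (some C)).foldl
          (fun (st : List Int × Int) w => (st.1 ++ [st.2 * 32], st.2 + w)) ([], 0)).1)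
      = (List.range C.toNat).map (fun (c : Nat) =>
          (wcol u utw cw (c : Int), xcol u utw cw (c : Int))) := by
  cases u with
  | false =>
    simp only [Bool.false_eq_true, if_false]
    exact cols_nonuniform C utw cw hC (hlen.resolve_left (by simp))
  | true =>
    simp only [if_true]
    exact cols_uniform C utw cw hC.le

lemma B_parts_eq (C : Int) (u : Bool) (utw : Int) (cw : List Int) (f : Int → Int) (dh : Int)
    (n : Nat) :
    ((List.range n).map (fun (j : Nat) => ((j : Int), (hrow f dh j, yrow f dh j)))).flatMap
        (fun rp => ((List.range C.toNat).map (fun (c : Nat) =>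
            ((c : Int), (wcol u utw cw (c : Int), xcol u utw cw (c : Int))))).map
          (fun cq => bPart C rp cq))
      = apar C u utw cw f dh n := by
  rw [List.flatMap_map, apar]
  congr 1
  funext j
  rw [List.map_map, partsRow]
  apply List.map_congr_left
  intro c _
  rfl

-- the two ports agree when the grid is empty

lemma main_zero (num_rows num_cols coded_width coded_height display_height : Int)
    (use_uniform_tiles : Bool) (row_heights col_widths : List Int)
    (hC : num_cols ≠ 0) (h0 : num_rows * num_cols ≤ 0) :
    filter_command num_rows num_cols coded_width coded_height display_height use_uniform_tiles row_heights col_widths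
      = filter_command_alt num_rows num_cols coded_width coded_height display_height use_uniform_tiles row_heights col_widths := by
  have hguard : num_rows ≤ 0 ∨ num_cols ≤ 0 := by
    by_contra h
    push_neg at h
    nlinarith [h.1, h.2]
  rw [filter_command_alt, if_pos hguard]
  rw [filter_command]
  rw [PySem.List.pyRange_one_eq_nil h0, List.foldl_nil]
  rfl

-- the two ports agree on a genuine grid

lemma main_pos (num_rows num_cols coded_width coded_height display_height : Int)
    (use_uniform_tiles : Bool) (row_heights col_widths : List Int)
    (hR : 0 < num_rows) (hC : 0 < num_cols)
    (hlen : use_uniform_tiles = true ∨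
      (num_rows ≤ (row_heights.length : Int) ∧ num_cols ≤ (col_widths.length : Int))) :
    filter_command num_rows num_cols coded_width coded_height display_height use_uniform_tiles row_heights col_widths
      = filter_command_alt num_rows num_cols coded_width coded_height display_height use_uniform_tiles row_heights col_widths := by
  have hnR : ¬ (num_rows ≤ 0 ∨ num_cols ≤ 0) := by omega
  simp only [filter_command, filter_command_alt, if_neg hnR]
  rw [show num_rows * num_cols = ((num_rows.toNat : Nat) : Int) * num_cols by
    rw [Int.toNat_of_nonneg hR.le]]
  rw [show (PySem.List.pyRange 0 num_rows : List Int)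
      = PySem.List.pyRange 0 ((num_rows.toNat : Nat) : Int) by
    rw [Int.toNat_of_nonneg hR.le]]
  rw [A_main num_rows num_cols display_height use_uniform_tiles row_heights col_widths
    (-(PySem.Int.floordiv (-coded_height) 32)) (PySem.Int.truncdiv coded_width num_cols)
    hC num_rows.toNat]
  rw [B_rows num_rows display_height use_uniform_tiles row_heights
    (-(PySem.Int.floordiv (-coded_height) 32)) num_rows.toNat]
  dsimp only
  rw [cols_all num_cols (PySem.Int.truncdiv coded_width num_cols) col_widths use_uniform_tiles
    hC (by
      rcases hlen with h | h
      · exact Or.inl h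
      · exact Or.inr h.2)]
  rw [enum_rowPairs, enum_map_range, B_parts_eq]
  apply final_strings
  rw [show (num_rows.toNat = (num_rows.toNat - 1) + 1) by omega, apar_succ]
  apply List.append_ne_nil_of_right_ne_nil
  simp only [partsRow, ne_eq, List.map_eq_nil_iff, List.range_eq_nil]
  omega

-- ===== VERDICT (by name: the statement is the Claim_ definition above) =====
theorem filter_command_spec : Claim_unchanged_filter_command := by
  intro num_rows num_cols coded_width coded_height display_height use_uniform_tiles row_heights col_widths hdom hpre
  unfold Spec_filter_command
  intro hnD
  obtain ⟨hC, hcase⟩ := hpre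
  rcases hcase with h0 | ⟨hR, hC', hlen⟩ | hW
  · exact main_zero _ _ _ _ _ _ _ _ hC h0
  · exact main_pos _ _ _ _ _ _ _ _ hR hC' hlen
  · unfold D_filter_command at hnD
    exact absurd hW hnD

theorem filter_command_changed : Claim_changed_filter_command := by
  unfold Claim_changed_filter_command; decide

-- inside D_ the grid is still non-empty, so A emits at least one crop chunk while B emits none

lemma aStep_len (R C dh : Int) (u : Bool) (rh cw : List Int) (p utw : Int)
    (st : String × List Int) (i : Int) :
    st.1.toList.length + 2 ≤ ((aStep R C dh u rh cw p utw st i).1).toList.length := by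
  simp [aStep, String.toList_append]

lemma foldl_len (R C dh : Int) (u : Bool) (rh cw : List Int) (p utw : Int) :
    ∀ (l : List Int) (st : String × List Int),
    st.1.toList.length ≤ ((l.foldl (aStep R C dh u rh cw p utw) st).1).toList.length := by
  intro l
  induction l with
  | nil => intro st; simp
  | cons i t ih =>
    intro st
    rw [List.foldl_cons]
    have h1 := aStep_len R C dh u rh cw p utw st i
    have h2 := ih (aStep R C dh u rh cw p utw st i)
    omega

lemma A_ne_empty (num_rows num_cols coded_width coded_height display_height : Int)
    (use_uniform_tiles : Bool) (row_heights col_widths : List Int)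
    (hpos : 0 < num_rows * num_cols) :
    filter_command num_rows num_cols coded_width coded_height display_height use_uniform_tiles row_heights col_widths ≠ "" := by
  have h1 : 2 ≤ (((PySem.List.pyRange 0 (num_rows * num_cols)).foldl
      (aStep num_rows num_cols display_height use_uniform_tiles row_heights col_widths
        (-(PySem.Int.floordiv (-coded_height) 32)) (PySem.Int.truncdiv coded_width num_cols))
      ("", [])).1).toList.length := by
    rw [PySem.List.pyRange_one_cons hpos, List.foldl_cons]
    have hstep := aStep_len num_rows num_cols display_height use_uniform_tiles row_heights
      col_widths (-(PySem.Int.floordiv (-coded_height) 32))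
      (PySem.Int.truncdiv coded_width num_cols) ("", ([] : List Int)) 0
    have hfold := foldl_len num_rows num_cols display_height use_uniform_tiles row_heights
      col_widths (-(PySem.Int.floordiv (-coded_height) 32))
      (PySem.Int.truncdiv coded_width num_cols)
      (PySem.List.pyRange (0 + 1) (num_rows * num_cols))
      (aStep num_rows num_cols display_height use_uniform_tiles row_heights col_widths
        (-(PySem.Int.floordiv (-coded_height) 32)) (PySem.Int.truncdiv coded_width num_cols)
        ("", ([] : List Int)) 0)
    have hv : ((("" : String), ([] : List Int)).1).toList.length = 0 := rfl
    omega
  have hlen : 1 ≤ (filter_command num_rows num_cols coded_width coded_height display_height use_uniform_tiles row_heights col_widths).toList.length := by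
    simp only [filter_command, PySem.Str.toList_slice, PySem.Chars.slice_eq_listSlice,
      PySem.List.slice_to_neg_one, List.length_dropLast]
    omega
  intro hE
  rw [hE] at hlen
  simp at hlen

theorem filter_command_tight : Claim_exact_filter_command := by
  intro num_rows num_cols coded_width coded_height display_height use_uniform_tiles row_heights col_widths hdom hpre hD
  obtain ⟨hCneg, hRcase, -⟩ := hD
  have hpos : 0 < num_rows * num_cols := by
    rcases hRcase with h1 | ⟨h1, h2⟩
    · subst h1; omega
    · subst h1; subst h2; norm_num
  have hB : filter_command_alt num_rows num_cols coded_width coded_height display_height use_uniform_tiles row_heights col_widths = "" := by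
    rw [filter_command_alt, if_pos (Or.inr hCneg.le)]
  rw [hB]
  exact A_ne_empty _ _ _ _ _ _ _ _ hpos
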